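-- pv_equiv track=rewrite | github.com/Peachypie98/programmers-python | 프로그래머스/레벨1/명예의 전당.py | solution
-- ===== SOURCE A (Python) =====
-- def solution(k, score):
--     a = []
--     answer = []
--     for i in score:
--         if (len(a) < k):
--             a.append(i)
--             a.sort()
--             answer.append(a[0])
--             continue
--         else:
--             for idx, y in enumerate(a):
--                 if (i > y):
--                     a[idx] = i
--                     a.sort()
--                     answer.append(a[0])
--                     break
--                 else:
--                     answer.append(a[0])
--                     break
--     return answer
-- ===== SOURCE B (Python) =====
-- def solution(k, score):
--     # Stateless: the day-j hall-of-fame minimum is the (len-k)-th element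
--     # (clamped to 0) of the sorted score prefix.
--     if k <= 0:
--         return []
--     answer = []
--     for j in range(len(score)):
--         pre = sorted(score[: j + 1])
--         answer.append(pre[max(j + 1 - k, 0)])
--     return answer
-- ===== Notes on version B (the rewrite author's own statement) =====
-- stated objective: simpler
-- what changed: B drops A's incrementally maintained sorted top-k buffer (insert/replace-min and re-sort every day) and instead recomputes each day's answer statelessly as sorted(prefix)[max(len(prefix)-k,0)], the k-th highest of the scores so far.
import Mathlib
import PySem

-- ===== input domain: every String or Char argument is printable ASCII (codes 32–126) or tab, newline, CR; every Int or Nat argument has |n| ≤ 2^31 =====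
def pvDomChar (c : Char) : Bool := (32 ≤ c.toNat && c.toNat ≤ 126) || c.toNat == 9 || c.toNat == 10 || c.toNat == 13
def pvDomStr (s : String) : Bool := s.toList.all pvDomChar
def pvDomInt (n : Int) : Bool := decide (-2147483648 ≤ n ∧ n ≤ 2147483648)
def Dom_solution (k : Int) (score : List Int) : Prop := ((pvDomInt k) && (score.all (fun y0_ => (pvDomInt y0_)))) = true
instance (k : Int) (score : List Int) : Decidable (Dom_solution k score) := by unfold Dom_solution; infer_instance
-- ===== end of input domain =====

-- B replaces A's incrementally maintained sorted top-k buffer by a stateless per-day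
-- recomputation: day j's answer is the (j+1-k)-th (clamped at 0) element of the sorted
-- score prefix.  Objective: simpler (no mutable hall-of-fame state); not faster.

-- ===== PORT A =====
-- one loop iteration of A; A's inner 'for … enumerate(a)' breaks in BOTH branches, so it
-- only ever inspects a[0] — the match transliterates that loop (empty a: zero iterations).
def stepA (k : Int) (st : List Int × List Int) (i : Int) : List Int × List Int :=
  if (st.1.length : Int) < k then
    -- a.append(i); a.sort(); answer.append(a[0])   (a[0] via headD: the list is nonempty here)
    let a' := PySem.List.sorted (st.1 ++ [i]) (fun x => x) false
    (a', st.2 ++ [a'.headD 0])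
  else
    match st.1 with
    | [] => st
    | y :: _ =>
      if i > y then
        -- a[idx] = i; a.sort(); answer.append(a[0])  (idx = 0)
        let a' := PySem.List.sorted (st.1.set 0 i) (fun x => x) false
        (a', st.2 ++ [a'.headD 0])
      else
        (st.1, st.2 ++ [y])

def solution (k : Int) (score : List Int) : List Int :=
  (score.foldl (stepA k) ([], [])).2

-- ===== PORT B =====
-- range(len(score)) → List.range; score[:j+1] → take (exact: j+1 ≥ 0);
-- pre[max(j+1-k,0)] → getD (exact: the index is nonnegative and < j+1 here).
def solution_alt (k : Int) (score : List Int) : List Int :=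
  if k ≤ 0 then []
  else
    (List.range score.length).map (fun j =>
      (PySem.List.sorted (score.take (j + 1)) (fun x => x) false).getD
        (max ((j : Int) + 1 - k) 0).toNat 0)

-- ===== PRECONDITION & SPEC =====
def Spec_solution (k : Int) (score : List Int) (out : List Int) : Prop := out = solution_alt k score
instance (k : Int) (score : List Int) (out : List Int) : Decidable (Spec_solution k score out) := by unfold Spec_solution; infer_instance

-- ===== CLAIM (what is proved, stated in full; the proofs are below) =====
def Claim_equal_solution : Prop := ∀ (k : Int) (score : List Int), Dom_solution k score → Spec_solution k score (solution k score)

-- ===== LEMMAS AND PROOFS =====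

-- abbreviations for the proofs
def asc (l : List Int) : List Int := PySem.List.sorted l (fun x => x) false
def ins (i : Int) (l : List Int) : List Int :=
  PySem.List.insertBy (fun a b => decide (a < b)) i l

theorem ins_nil (i : Int) : ins i [] = [i] := rfl

theorem ins_cons (i y : Int) (ys : List Int) :
    ins i (y :: ys) = if i < y then i :: y :: ys else y :: ins i ys := by
  simp [ins, PySem.List.insertBy]

theorem ins_perm (i : Int) (l : List Int) : (ins i l).Perm (i :: l) := by
  induction l with
  | nil => simp [ins_nil]
  | cons y ys ih =>
    rw [ins_cons]
    split_ifs with h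
    · exact List.Perm.refl _
    · exact (ih.cons y).trans (List.Perm.swap i y ys)

theorem ins_sorted (i : Int) (l : List Int) (hl : l.Pairwise (· ≤ ·)) :
    (ins i l).Pairwise (· ≤ ·) := by
  induction l with
  | nil => simp [ins_nil]
  | cons y ys ih =>
    rw [ins_cons]
    rcases List.pairwise_cons.mp hl with ⟨hy, hys⟩
    split_ifs with h
    · refine List.pairwise_cons.mpr ⟨?_, hl⟩
      intro a ha
      rcases List.mem_cons.mp ha with ha | ha
      · omega
      · exact le_trans (le_of_lt h) (hy a ha)
    · refine List.pairwise_cons.mpr ⟨?_, ih hys⟩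
      intro a ha
      rcases List.mem_cons.mp (((ins_perm i ys).mem_iff).mp ha) with ha | ha
      · omega
      · exact hy a ha

theorem ins_self_of_forall_le (y : Int) (l : List Int) (h : ∀ a ∈ l, y ≤ a) :
    ins y l = y :: l := by
  induction l with
  | nil => rfl
  | cons a r ih =>
    rw [ins_cons]
    split_ifs with hlt
    · rfl
    · have hya : y ≤ a := h a (by simp)
      have hay : a = y := by omega
      rw [ih (fun b hb => h b (by simp [hb])), hay]

theorem asc_append_singleton (p : List Int) (i : Int) : asc (p ++ [i]) = ins i (asc p) := by
  simp only [asc, ins, PySem.List.sorted_eq_foldl_insertBy, List.foldl_append, List.foldl_cons,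
    List.foldl_nil]

theorem asc_cons_of_sorted (i : Int) (t : List Int) (ht : t.Pairwise (· ≤ ·)) :
    asc (i :: t) = ins i t := by
  exact PySem.List.sorted_id_eq_of_perm_of_pairwise _ _ (ins_perm i t) (ins_sorted i t ht)

-- i ≤ l[q] on a sorted l: inserting i shifts nothing past position q
theorem drop_ins_of_le (i : Int) (l : List Int) (q : Nat) (hq : q < l.length)
    (hl : l.Pairwise (· ≤ ·)) (h : i ≤ l[q]) :
    (ins i l).drop (q + 1) = l.drop q := by
  induction l generalizing q with
  | nil => simp at hq
  | cons y ys ih =>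
    rw [ins_cons]
    rcases List.pairwise_cons.mp hl with ⟨hy, hys⟩
    cases q with
    | zero =>
      simp only [List.getElem_cons_zero] at h
      split_ifs with hlt
      · simp
      · have hiy : i = y := by omega
        subst hiy
        simp [ins_self_of_forall_le i ys hy]
    | succ q' =>
      simp only [List.getElem_cons_succ] at h
      have hq' : q' < ys.length := by simpa using hq
      split_ifs with hlt
      · simp only [List.drop_succ_cons]
      · simp only [List.drop_succ_cons]
        exact ih q' hq' hys h

-- l[q] < i on a sorted l: the insertion happens strictly after position q
theorem ins_of_gt (i : Int) (l : List Int) (q : Nat) (hq : q < l.length)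
    (hl : l.Pairwise (· ≤ ·)) (h : l[q] < i) :
    ins i l = l.take (q + 1) ++ ins i (l.drop (q + 1)) := by
  induction l generalizing q with
  | nil => simp at hq
  | cons y ys ih =>
    rw [ins_cons]
    rcases List.pairwise_cons.mp hl with ⟨hy, hys⟩
    cases q with
    | zero =>
      simp only [List.getElem_cons_zero] at h
      rw [if_neg (by omega)]
      simp
    | succ q' =>
      simp only [List.getElem_cons_succ] at h
      have hq' : q' < ys.length := by simpa using hq
      have hlt : ¬ i < y := by
        have := hy ys[q'] (List.getElem_mem hq')
        omega
      rw [if_neg hlt]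
      simp only [List.take_succ_cons, List.drop_succ_cons, List.cons_append, List.cons.injEq,
        true_and]
      exact ih q' hq' hys h

theorem headD_drop (l : List Int) (n : Nat) (d : Int) : (l.drop n).headD d = l.getD n d := by
  rw [List.headD_eq_head?_getD, List.head?_drop, List.getD_eq_getElem?_getD]

-- the per-prefix answer entry B computes
def entryB (K : Nat) (p : List Int) (j : Nat) : Int :=
  (asc (p.take (j + 1))).getD (max ((j : Int) + 1 - (K : Int)) 0).toNat 0

-- the loop invariant of A's fold, for k = K ≥ 1: the buffer is the sorted prefix minus its
-- smallest length-K excess, and the answers are B's entries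
theorem invA (K : Nat) (hK : 1 ≤ K) (p : List Int) :
    p.foldl (stepA (K : Int)) ([], []) =
      ((asc p).drop (p.length - K), (List.range p.length).map (entryB K p)) := by
  induction p using List.reverseRecOn with
  | nil => simp [asc, PySem.List.sorted]
  | append_singleton p i ih =>
    rw [List.foldl_append, List.foldl_cons, List.foldl_nil, ih]
    have hlen : (asc p).length = p.length := PySem.List.length_sorted p _ _
    have hsort : (asc p).Pairwise (· ≤ ·) := by
      simpa using PySem.List.sorted_pairwise p (fun x => x)
    have hmap : (List.range p.length).map (entryB K p)
        = (List.range p.length).map (entryB K (p ++ [i])) := by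
      refine List.map_congr_left (fun j hj => ?_)
      rw [List.mem_range] at hj
      unfold entryB
      rw [List.take_append_of_le_length (by omega)]
    by_cases hm : p.length < K
    · -- fill phase: a.append(i); a.sort()
      have hcond : (((asc p).drop (p.length - K)).length : Int) < (K : Int) := by
        simp [hlen]; omega
      have hd0 : p.length - K = 0 := by omega
      unfold stepA
      rw [if_pos (by simpa [hd0] using hcond)]
      have ha' : PySem.List.sorted ((asc p).drop (p.length - K) ++ [i]) (fun x => x) false
          = asc (p ++ [i]) := by
        rw [hd0, List.drop_zero]
        show asc (asc p ++ [i]) = asc (p ++ [i])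
        rw [asc_append_singleton, asc_append_singleton]
        congr 1
        exact PySem.List.sorted_sorted p _
      simp only [ha']
      refine Prod.ext ?_ ?_
      · simp only
        rw [List.length_append]
        have : p.length + [i].length - K = 0 := by simp; omega
        rw [this, List.drop_zero]
      · simp only
        rw [hmap, List.length_append, List.length_singleton, List.range_succ, List.map_append,
          List.map_singleton]
        congr 1
        unfold entryB
        have hidx : (max (((p.length : Int)) + 1 - (K : Int)) 0).toNat = 0 := by omega
        rw [hidx, List.take_of_length_le (by simp), ← headD_drop _ 0, List.drop_zero]
    · -- full phase
      have hd : p.length - K < (asc p).length := by omega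
      have hds : (asc p).drop (p.length - K)
          = (asc p)[p.length - K] :: (asc p).drop (p.length - K + 1) :=
        List.drop_eq_getElem_cons hd
      have hcond : ¬ ((((asc p).drop (p.length - K)).length : Int) < (K : Int)) := by
        simp [hlen]; omega
      set y := (asc p)[p.length - K] with hy
      set t := (asc p).drop (p.length - K + 1) with htdef
      have hts : t.Pairwise (· ≤ ·) := hsort.sublist (List.drop_sublist _ _)
      have hidx : (max (((p.length : Int)) + 1 - (K : Int)) 0).toNat = p.length + 1 - K := by
        omega
      have htk : (p ++ [i]).take (p.length + 1) = p ++ [i] := by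
        rw [List.take_of_length_le (by simp)]
      unfold stepA
      rw [if_neg hcond]
      simp only [hds]
      by_cases hgt : i > y
      · rw [if_pos hgt]
        have hset : (y :: t).set 0 i = i :: t := rfl
        have ha' : PySem.List.sorted ((y :: t).set 0 i) (fun x => x) false = ins i t := by
          rw [hset]
          exact asc_cons_of_sorted i t hts
        have hsplit : asc (p ++ [i]) = (asc p).take (p.length - K + 1) ++ ins i t := by
          rw [asc_append_singleton]
          exact ins_of_gt i (asc p) (p.length - K) hd hsort hgt
        have hdropnew : (asc (p ++ [i])).drop (p.length + 1 - K) = ins i t := by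
          rw [hsplit]
          have h1 : p.length + 1 - K = ((asc p).take (p.length - K + 1)).length := by
            rw [List.length_take]; omega
          rw [h1, List.drop_left]
        simp only [ha']
        refine Prod.ext ?_ ?_
        · simp only
          rw [List.length_append, List.length_singleton, hdropnew]
        · simp only
          rw [hmap, List.length_append, List.length_singleton, List.range_succ, List.map_append,
            List.map_singleton]
          congr 1
          unfold entryB
          rw [htk, hidx, ← headD_drop, hdropnew]
      · rw [if_neg hgt]
        have hle : i ≤ y := by omega
        have hdropnew : (asc (p ++ [i])).drop (p.length + 1 - K)
            = (asc p).drop (p.length - K) := by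
          rw [asc_append_singleton]
          have h1 : p.length + 1 - K = p.length - K + 1 := by omega
          rw [h1]
          exact drop_ins_of_le i (asc p) (p.length - K) hd hsort hle
        refine Prod.ext ?_ ?_
        · simp only
          rw [List.length_append, List.length_singleton, hdropnew, hds]
        · simp only
          rw [hmap, List.length_append, List.length_singleton, List.range_succ, List.map_append,
            List.map_singleton]
          congr 1
          unfold entryB
          rw [htk, hidx, ← headD_drop, hdropnew, hds]
          rfl

-- with k ≤ 0 A's buffer never fills and its inner loop never runs: the fold is inert
theorem foldA_nonpos (k : Int) (hk : k ≤ 0) (p : List Int) :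
    p.foldl (stepA k) ([], []) = ([], []) := by
  induction p with
  | nil => rfl
  | cons i p ih =>
    rw [List.foldl_cons]
    have hstep : stepA k ([], ([] : List Int)) i = ([], []) := by
      unfold stepA
      rw [if_neg (by simp; omega)]
    rw [hstep, ih]

-- ===== VERDICT (by name: the statement is the Claim_ definition above) =====
theorem solution_spec : Claim_equal_solution := by
  intro k score _
  unfold Spec_solution solution solution_alt
  by_cases hk : k ≤ 0
  · rw [foldA_nonpos k hk score, if_pos hk]
  · rw [if_neg hk]
    have hk1 : 1 ≤ k.toNat := by omega
    have hkk : (k.toNat : Int) = k := Int.toNat_of_nonneg (by omega)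
    rw [← hkk, invA k.toNat hk1 score]
    unfold entryB asc
    rfl
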